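-- pv_equiv track=rewrite | github.com/oorgrim/python-itstep | Dec-28/02.py | find_same_surnames
-- ===== SOURCE A (Python) =====
-- def find_same_surnames(names):
--     surname_dict = {}
--
--     for full_name in names:
--         first_name, surname = full_name.split()
--         if surname in surname_dict:
--             surname_dict[surname].append(full_name)
--         else:
--             surname_dict[surname] = [full_name]
--
--     return surname_dict
-- ===== SOURCE B (Python) =====
-- def find_same_surnames(names):
--     # Pass 1: extract each surname (two-target unpacking keeps the ValueError
--     # behaviour for names that do not split into exactly two tokens).
--     surnames = []
--     for full_name in names:
--         first_name, surname = full_name.split()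
--         surnames.append(surname)
--     # Pass 2: for each distinct surname (in first-appearance order) collect
--     # all full names carrying it, in their original order.
--     result = {}
--     for s in surnames:
--         if s not in result:
--             result[s] = [n for n, s2 in zip(names, surnames) if s2 == s]
--     return result
-- ===== Notes on version B (the rewrite author's own statement) =====
-- stated objective: alternative
-- what changed: A builds the dict incrementally in one pass, appending each name to its surname's growing list; B first extracts all surnames, then builds each distinct surname's group exactly once by filtering the zipped (name, surname) pairs.
import Mathlib
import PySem

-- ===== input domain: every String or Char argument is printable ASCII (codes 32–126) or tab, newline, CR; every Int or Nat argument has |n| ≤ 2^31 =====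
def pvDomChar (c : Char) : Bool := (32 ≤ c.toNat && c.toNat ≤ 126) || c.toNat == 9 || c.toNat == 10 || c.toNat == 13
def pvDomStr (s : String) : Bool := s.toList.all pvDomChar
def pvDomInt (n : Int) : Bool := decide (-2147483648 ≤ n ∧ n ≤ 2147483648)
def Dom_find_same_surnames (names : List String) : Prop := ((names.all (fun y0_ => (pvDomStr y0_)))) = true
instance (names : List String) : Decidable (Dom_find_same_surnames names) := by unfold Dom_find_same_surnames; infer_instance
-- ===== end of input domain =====

-- B replaces A's incremental dict-building loop by two passes: extract all surnames,
-- then build each group once with a filtering comprehension (alternative decomposition, not faster).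

-- ===== PORT A =====
-- one pass: grow the group of `surname` (or start it) for each full name in turn
def find_same_surnames (names : List String) : List (String × List String) :=
  (names.foldl (fun surname_dict full_name =>
      match PySem.Str.split₀ full_name with
      | [_first_name, surname] =>
          if surname_dict.contains surname then
            surname_dict.modify surname [] (fun l => l ++ [full_name])
          else
            surname_dict.insert surname [full_name]
      | _ => surname_dict   -- Python raises ValueError here; excluded by Pre_
      ) PySem.Dict.empty).items

-- ===== PORT B =====
-- pass 1: the surname of every name; pass 2: one filtered group per distinct surname
def find_same_surnames_alt (names : List String) : List (String × List String) :=
  let surnames := names.map (fun full_name =>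
      -- the two-target unpacking: exactly two tokens, keep the second;
      -- anything else is Python's ValueError, excluded by Pre_
      match PySem.Str.split₀ full_name with
      | [] => ""
      | _first_name :: rest =>
        match rest with
        | [] => ""
        | surname :: rest2 =>
          match rest2 with
          | [] => surname
          | _ :: _ => "")
  (surnames.foldl (fun result s =>
      if result.contains s then result
      else result.insert s
        (((names.zip surnames).filter (fun p => p.2 == s)).map (fun p => p.1)))
    PySem.Dict.empty).items

-- ===== PRECONDITION & SPEC =====
-- Pre_ excludes exactly the names that do not split into two whitespace-separated
-- tokens, on which Python A raises ValueError during unpacking.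
def Pre_find_same_surnames (names : List String) : Prop :=
  ∀ n ∈ names, (PySem.Str.split₀ n).length = 2
instance (names : List String) : Decidable (Pre_find_same_surnames names) := by
  unfold Pre_find_same_surnames; infer_instance

def pvWitness_find_same_surnames : List String :=
  ["Ann Smith", "Bob Smith", "Cy Jones", "Di Smith"]

def Spec_find_same_surnames (names : List String) (out : List (String × List String)) : Prop := out = find_same_surnames_alt names
instance (names : List String) (out : List (String × List String)) : Decidable (Spec_find_same_surnames names out) := by unfold Spec_find_same_surnames; infer_instance

-- ===== CLAIM (what is proved, stated in full; the proofs are below) =====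
def Claim_equal_find_same_surnames : Prop := ∀ (names : List String), Dom_find_same_surnames names → Pre_find_same_surnames names → Spec_find_same_surnames names (find_same_surnames names)

-- ===== LEMMAS AND PROOFS =====

-- the surname a well-formed full name unpacks to (proof-side name for the match both ports use)
def pvSurname (full_name : String) : String :=
  match PySem.Str.split₀ full_name with
  | [_first_name, surname] => surname
  | _ => ""

-- A's loop body, on a well-formed name, is a single Dict.modify
lemma stepA_eq (full : String) (h : (PySem.Str.split₀ full).length = 2)
    (d : PySem.Dict String (List String)) :
    (match PySem.Str.split₀ full with
      | [_first_name, surname] =>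
          if d.contains surname then d.modify surname [] (fun l => l ++ [full])
          else d.insert surname [full]
      | _ => d)
      = d.modify (pvSurname full) [] (fun l => l ++ [full]) := by
  match e : PySem.Str.split₀ full with
  | [] | [_] | _ :: _ :: _ :: _ => simp [e] at h
  | [a, b] =>
    simp only [pvSurname, e]
    by_cases hc : d.contains b
    · simp [hc]
    · simp only [hc, if_neg Bool.false_ne_true]
      simp [PySem.Dict.modify, PySem.Dict.getD_of_not_contains _ _ (by simpa using hc)]

-- B's loop: folding "insert a fixed value on first sight" from a literal table
lemma foldB (V : String → List String) (l : List String) :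
    ∀ (S : List String), S.Nodup →
    (l.foldl (fun d s => if d.contains s then d else d.insert s (V s))
        (PySem.Dict.mk (S.map (fun s => (s, V s))))).items
      = (PySem.Set.update S l).map (fun s => (s, V s)) := by
  induction l with
  | nil => intro S _; simp [PySem.Set.update]
  | cons s l ih =>
    intro S hS
    by_cases hs : s ∈ S
    · have hc : (PySem.Dict.mk (S.map (fun s => (s, V s)))).contains s = true := by
        simp only [PySem.Dict.contains_mk, List.any_map, List.any_eq_true]
        exact ⟨s, hs, by simp⟩
      have hupd : PySem.Set.update S (s :: l) = PySem.Set.update (PySem.Set.add S s) l := rfl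
      have hadd : PySem.Set.add S s = S := by
        simp [PySem.Set.add, PySem.Set.contains, hs]
      simp only [List.foldl_cons, hc, hupd, hadd]
      exact ih S hS
    · have hc : (PySem.Dict.mk (S.map (fun s => (s, V s)))).contains s = false := by
        simp only [PySem.Dict.contains_mk, List.any_map, Function.comp_def, List.any_eq_false]
        intro x hx e
        exact hs ((eq_of_beq e) ▸ hx)
      have hins : (PySem.Dict.mk (S.map (fun s => (s, V s)))).insert s (V s)
          = PySem.Dict.mk ((S ++ [s]).map (fun s => (s, V s))) := by
        apply PySem.Dict.ext
        rw [PySem.Dict.items_insert_of_not_contains _ _ hc]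
        simp
      have hupd : PySem.Set.update S (s :: l) = PySem.Set.update (S ++ [s]) l := by
        have : PySem.Set.add S s = S ++ [s] := by
          simp [PySem.Set.add, PySem.Set.contains, hs]
        simp [PySem.Set.update, this]
      simp only [List.foldl_cons, hc, if_neg Bool.false_ne_true, hins, hupd]
      exact ih (S ++ [s])
        (by refine hS.append (List.nodup_singleton s) ?_
            simp [List.disjoint_singleton, hs])

-- ===== VERDICT (by name: the statement is the Claim_ definition above) =====
theorem find_same_surnames_spec : Claim_equal_find_same_surnames := by
  intro names _hdom hpre
  unfold Spec_find_same_surnames find_same_surnames find_same_surnames_alt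
  have hsurf : (fun full_name => match PySem.Str.split₀ full_name with
      | [] => ""
      | _first_name :: rest =>
        match rest with
        | [] => ""
        | surname :: rest2 =>
          match rest2 with
          | [] => surname
          | _ :: _ => "") = pvSurname := by
    funext n
    rcases hsp : PySem.Str.split₀ n with _ | ⟨a, _ | ⟨b, _ | ⟨c, t⟩⟩⟩ <;> simp [pvSurname, hsp]
  rw [hsurf]
  -- A's fold is the modify-fold
  rw [PySem.List.foldl_congr_mem names _
        (fun d full => d.modify (pvSurname full) [] (fun l => l ++ [full]))
        PySem.Dict.empty
        (fun d full hf => stepA_eq full (hpre full hf) d)]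
  -- B's fold by foldB with the fixed value function
  set V : String → List String :=
    fun s => ((names.zip (names.map pvSurname)).filter (fun p => p.2 == s)).map (fun p => p.1) with hV
  -- A's side: items = keys.map (getD)
  set dA := names.foldl (fun d full => d.modify (pvSurname full) [] (fun l => l ++ [full]))
      PySem.Dict.empty with hdA
  have hkeys : dA.keys = PySem.Set.ofList (names.map pvSurname) := by
    rw [hdA, PySem.Dict.keys_foldl_modify_key names pvSurname [] (fun _ full l => l ++ [full])]
    simp [PySem.Set.update_nil_left]
  have hnodup : dA.keys.Nodup := by
    rw [hkeys]; exact PySem.Set.nodup_ofList _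
  rw [PySem.Dict.items_eq_map_keys dA hnodup [], hkeys]
  have hempty : (PySem.Dict.empty : PySem.Dict String (List String))
      = PySem.Dict.mk (([] : List String).map (fun s => (s, V s))) := rfl
  rw [hempty, foldB V (names.map pvSurname) [] List.nodup_nil]
  -- Set.update [] l = Set.ofList l
  rw [PySem.Set.update_nil_left]
  -- pointwise: dA.getD k [] = V k
  refine List.map_congr_left (fun k _hk => ?_)
  have hfold : dA = (names.map (fun n => (pvSurname n, n))).foldl
      (fun d p => d.modify p.1 [] (fun x => x ++ [p.2])) PySem.Dict.empty := by
    rw [hdA, List.foldl_map]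
  have hgetD : dA.getD k [] =
      ((names.map (fun n => (pvSurname n, n))).filter (fun p => p.1 == k)).map (fun p => p.2) := by
    rw [hfold, PySem.Dict.getD_foldl_modify_append]
    simp
  have hVk : V k = names.filter (fun n => pvSurname n == k) := by
    rw [hV]
    have hz : names.zip (names.map pvSurname) = names.map (fun n => (n, pvSurname n)) := by
      have h := @List.zip_map' _ _ _ id pvSurname names
      simpa using h
    simp only [hz, List.filter_map]
    simp [Function.comp_def, List.map_id']
  rw [hgetD, hVk, List.filter_map]
  simp [Function.comp_def, List.map_id']
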